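-- pv_equiv track=rewrite | github.com/ayazkhan27/cyclic | testcyclicagain.py | brute_force_frequency_analysis
-- ===== SOURCE A (Python) =====
-- def brute_force_frequency_analysis(cipher_text, possible_movements):
--     freq_movements = sorted(possible_movements, key=lambda x: cipher_text.count(x), reverse=True)
--     possible_chars = 'ETAOINSHRDLCUMWFGYPBVKJXQZ'  # Frequency order of letters in English
--     plain_text = []
--     for c in cipher_text:
--         if c in freq_movements:
--             char = possible_chars[freq_movements.index(c) % len(possible_chars)]
--             plain_text.append(char)
--         else:
--             return None
--     return ''.join(plain_text)
-- ===== SOURCE B (Python) =====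
-- def brute_force_frequency_analysis(cipher_text, possible_movements):
--     possible_chars = 'ETAOINSHRDLCUMWFGYPBVKJXQZ'
--     counts = [cipher_text.count(m) for m in possible_movements]
--     # Counting sort by occurrence count: walk the count values from the highest
--     # down to 0 and emit the movements of each bucket in original order -- this
--     # is the stable frequency-descending order without a comparison sort.
--     ordered = []
--     for c in range(max(counts, default=-1), -1, -1):
--         for m, cm in zip(possible_movements, counts):
--             if cm == c:
--                 ordered.append(m)
--     # Translation table: first occurrence of a movement keeps its rank's letter.
--     table = {}
--     i = 0
--     for m in ordered:
--         if m not in table: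
--             table[m] = possible_chars[i % len(possible_chars)]
--         i += 1
--     out = []
--     for ch in cipher_text:
--         if ch not in table:
--             return None
--         out.append(table[ch])
--     return ''.join(out)
-- ===== Notes on version B (the rewrite author's own statement) =====
-- stated objective: alternative
-- what changed: B replaces A's comparison sort with a counting sort (walk the count values from max down to 0, emitting each bucket in original order) and replaces A's per-character membership test plus list.index scan with a movement-to-letter table built once.
import Mathlib
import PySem

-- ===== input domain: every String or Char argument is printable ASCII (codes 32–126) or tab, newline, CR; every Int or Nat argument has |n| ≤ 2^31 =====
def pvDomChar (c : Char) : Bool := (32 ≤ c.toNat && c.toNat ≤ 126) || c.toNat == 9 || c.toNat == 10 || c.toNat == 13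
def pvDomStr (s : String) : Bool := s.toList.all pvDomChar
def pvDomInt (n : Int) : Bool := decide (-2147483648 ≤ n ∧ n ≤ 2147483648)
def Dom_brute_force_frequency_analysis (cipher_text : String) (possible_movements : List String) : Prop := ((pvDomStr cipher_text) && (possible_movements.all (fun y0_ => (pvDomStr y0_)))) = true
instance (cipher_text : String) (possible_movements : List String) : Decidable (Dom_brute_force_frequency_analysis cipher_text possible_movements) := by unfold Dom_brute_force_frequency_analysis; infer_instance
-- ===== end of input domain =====

-- B replaces A's comparison sort and per-character list scans (membership + list.index) by a
-- counting sort over the occurrence counts plus a movement→letter table built once.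

-- ===== PORT A =====
-- the 'for c in cipher_text' loop with early 'return None'; acc is plain_text
def pvALoop (freq : List String) (pc : List Char) : List Char → List Char → Option String
  | [], acc => some (String.ofList acc)                       -- ''.join(plain_text)
  | c :: rest, acc =>
    if freq.contains (String.ofList [c]) then                 -- 'c in freq_movements'
      match PySem.List.index? freq (String.ofList [c]) with   -- freq_movements.index(c)
      | some i =>
        match pc[i % pc.length]? with                     -- possible_chars[i % 26]
        | some ch => pvALoop freq pc rest (acc ++ [ch])
        | none => none  -- IndexError guard; unreachable (pc.length = 26, i % 26 < 26)
      | none => none    -- unreachable: membership succeeded, so index() raises nothing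
    else none           -- 'return None'

def brute_force_frequency_analysis (cipher_text : String) (possible_movements : List String) : Option String :=
  let freq_movements := PySem.List.sorted possible_movements (fun x => PySem.Str.count cipher_text x) true
  let possible_chars := "ETAOINSHRDLCUMWFGYPBVKJXQZ".toList
  pvALoop freq_movements possible_chars cipher_text.toList []

-- ===== PORT B =====
-- 'for m in ordered: if m not in table: table[m] = possible_chars[i % 26]; i += 1'
def pvRank (pc : List Char) : Nat → List String → PySem.Dict String Char → PySem.Dict String Char
  | _, [], d => d
  | i, m :: rest, d =>
    pvRank pc (i + 1) rest
      (if d.contains m then d else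
        match pc[i % pc.length]? with                     -- possible_chars[i % len(possible_chars)]
        | some ch => d.insert m ch
        | none => d)  -- IndexError guard; unreachable (possible_chars nonempty)

-- 'for ch in cipher_text: if ch not in table: return None; out.append(table[ch])'
def pvBLoop (rank : PySem.Dict String Char) : List Char → List Char → Option String
  | [], acc => some (String.ofList acc)                       -- ''.join(out)
  | c :: rest, acc =>
    match rank.get? (String.ofList [c]) with
    | some ch => pvBLoop rank rest (acc ++ [ch])
    | none => none

def brute_force_frequency_analysis_alt (cipher_text : String) (possible_movements : List String) : Option String :=
  let possible_chars := "ETAOINSHRDLCUMWFGYPBVKJXQZ".toList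
  let counts : List Int := possible_movements.map (fun m => (PySem.Str.count cipher_text m : Int))
  -- counting sort: 'for c in range(max(counts, default=-1), -1, -1): for m, cm in zip(...): if cm == c: ordered.append(m)'
  let ordered := (PySem.List.pyRange (PySem.List.maxD counts (fun c => c) (-1)) (-1) (-1)).foldl
    (fun acc c => (possible_movements.zip counts).foldl
      (fun a p => if p.2 = c then a ++ [p.1] else a) acc) []
  let table := pvRank possible_chars 0 ordered PySem.Dict.empty
  pvBLoop table cipher_text.toList []

-- ===== PRECONDITION & SPEC =====
def Spec_brute_force_frequency_analysis (cipher_text : String) (possible_movements : List String) (out : Option String) : Prop := out = brute_force_frequency_analysis_alt cipher_text possible_movements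
instance (cipher_text : String) (possible_movements : List String) (out : Option String) : Decidable (Spec_brute_force_frequency_analysis cipher_text possible_movements out) := by unfold Spec_brute_force_frequency_analysis; infer_instance

-- ===== CLAIM (what is proved, stated in full; the proofs are below) =====
def Claim_equal_brute_force_frequency_analysis : Prop := ∀ (cipher_text : String) (possible_movements : List String), Dom_brute_force_frequency_analysis cipher_text possible_movements → Spec_brute_force_frequency_analysis cipher_text possible_movements (brute_force_frequency_analysis cipher_text possible_movements)

-- ===== LEMMAS AND PROOFS =====

-- looking up s in the table built from 'rest' starting at counter i
theorem pvRank_get? (pc : List Char) (rest : List String) :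
    ∀ (i : Nat) (d : PySem.Dict String Char) (s : String),
      (pvRank pc i rest d).get? s =
        match d.get? s with
        | some ch => some ch
        | none =>
          match PySem.List.index? rest s with
          | some j => pc[(i + j) % pc.length]?
          | none => none := by
  induction rest with
  | nil =>
    intro i d s
    simp only [pvRank, PySem.List.index?]
    cases d.get? s <;> rfl
  | cons m rest ih =>
    intro i d s
    simp only [pvRank, ih]
    by_cases hms : m = s
    · subst hms
      rw [PySem.List.index?_cons_self]
      by_cases hc : d.contains m = true
      · have hsome : (d.get? m).isSome = true := by
          rw [← PySem.Dict.contains_eq_isSome_get?]; exact hc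
        obtain ⟨v, hv⟩ := Option.isSome_iff_exists.mp hsome
        simp [hc, hv]
      · have hn : d.get? m = none := by
          cases h : d.get? m with
          | none => rfl
          | some v => rw [PySem.Dict.contains_eq_isSome_get?, h] at hc; simp at hc
        simp only [hc, if_false, Bool.false_eq_true, hn]
        cases hpc : pc[i % pc.length]? with
        | some ch =>
          simp [PySem.Dict.get?_insert_self]
        | none =>
          -- pc must be empty, so every lookup in pc is none
          have hpcnil : pc = [] := by
            cases pc with
            | nil => rfl
            | cons a t =>
              exfalso
              have hlt : i % (t.length + 1) < t.length + 1 :=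
                Nat.mod_lt _ (by omega)
              simp at hpc
              omega
          subst hpcnil
          simp [hn, PySem.List.index?_eq_idxOf?]
          cases List.idxOf? m rest <;> rfl
    · rw [PySem.List.index?_cons_of_ne rest hms]
      have hget : ∀ (ch : Char), (PySem.Dict.insert d m ch).get? s = d.get? s :=
        fun ch => PySem.Dict.get?_insert_of_ne d ch (fun h => hms h.symm)
      have harith : ∀ j : Nat, (i + 1) + j = i + (j + 1) := by omega
      by_cases hc : d.contains m = true
      · simp only [hc, if_true]
        cases d.get? s <;> cases hj : PySem.List.index? rest s <;> simp [harith]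
      · simp only [hc, if_false, Bool.false_eq_true]
        cases hpc : pc[i % pc.length]? with
        | some ch =>
          simp only [hget]
          cases d.get? s <;> cases hj : PySem.List.index? rest s <;> simp [harith]
        | none =>
          cases d.get? s <;> cases hj : PySem.List.index? rest s <;> simp [harith]

-- per-character: A's scan computes exactly the table lookup
theorem pvChar_eq (freq : List String) (pc : List Char) (s : String) :
    (pvRank pc 0 freq PySem.Dict.empty).get? s =
      if freq.contains s then
        match PySem.List.index? freq s with
        | some i => pc[i % pc.length]?
        | none => none
      else none := by
  rw [pvRank_get?]
  have he : (PySem.Dict.empty : PySem.Dict String Char).get? s = none := rfl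
  rw [he]
  cases hj : PySem.List.index? freq s with
  | some j =>
    have hmem : s ∈ freq :=
      (PySem.List.index?_isSome_iff freq s).mp (by rw [hj]; rfl)
    rw [if_pos (List.contains_iff_mem.mpr hmem)]
    simp
  | none =>
    have hnm : s ∉ freq := (PySem.List.index?_eq_none_iff freq s).mp hj
    rw [if_neg (by simpa using hnm)]

-- the two decode loops agree for every accumulator
theorem pvLoop_eq (freq : List String) (pc : List Char) (cs : List Char) :
    ∀ acc, pvALoop freq pc cs acc = pvBLoop (pvRank pc 0 freq PySem.Dict.empty) cs acc := by
  induction cs with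
  | nil => intro acc; rfl
  | cons c rest ih =>
    intro acc
    simp only [pvALoop, pvBLoop, pvChar_eq]
    by_cases hc : freq.contains (String.ofList [c]) = true
    · rw [if_pos hc, if_pos hc]
      cases hj : PySem.List.index? freq (String.ofList [c]) with
      | some i =>
        cases hpc : pc[i % pc.length]? with
        | some ch => simp [hpc, ih]
        | none => simp [hpc]
      | none => rfl
    · rw [if_neg hc, if_neg hc]

-- inserting x into a list whose prefix only has keys ≥ k x skips the prefix
theorem pv_insertBy_append (k : String → Int) (x : String) (L1 L2 : List String)
    (h : ∀ y ∈ L1, ¬ (k y < k x)) :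
    PySem.List.insertBy (fun a b => decide (k b < k a)) x (L1 ++ L2)
      = L1 ++ PySem.List.insertBy (fun a b => decide (k b < k a)) x L2 := by
  induction L1 with
  | nil => rfl
  | cons y t ih =>
    have hy : ¬ (k y < k x) := h y (by simp)
    simp only [List.cons_append, PySem.List.insertBy, hy, decide_false, Bool.false_eq_true,
      if_false]
    rw [ih (fun z hz => h z (by simp [hz]))]

-- inserting x before a list whose keys are all < k x puts it in front
theorem pv_insertBy_all_lt (k : String → Int) (x : String) (L2 : List String)
    (h : ∀ y ∈ L2, k y < k x) :
    PySem.List.insertBy (fun a b => decide (k b < k a)) x L2 = x :: L2 := by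
  cases L2 with
  | nil => rfl
  | cons y t =>
    have hy : k y < k x := h y (by simp)
    simp [PySem.List.insertBy, hy]

theorem pv_flatMap_congr {α β : Type} (D : List α) (f g : α → List β)
    (h : ∀ c ∈ D, f c = g c) : D.flatMap f = D.flatMap g := by
  simp only [List.flatMap_def]
  rw [List.map_congr_left h]

-- counting sort: emitting the buckets of a strictly descending count list D
-- that covers all keys reproduces Python's stable reverse sort
theorem pv_buckets_eq_sorted (k : String → Int) (D : List Int)
    (hD : D.Pairwise (· > ·)) :
    ∀ (pm : List String), (∀ m ∈ pm, k m ∈ D) →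
      D.flatMap (fun c => pm.filter (fun m => decide (k m = c)))
        = PySem.List.sorted pm k true := by
  intro pm
  induction pm using List.reverseRecOn with
  | nil => intro _; simp [PySem.List.sorted]
  | append_singleton xs x ih =>
    intro hmem
    have hx : k x ∈ D := hmem x (by simp)
    obtain ⟨D1, D2, hsplit⟩ := List.append_of_mem hx
    subst hsplit
    have hpw := hD
    rw [List.pairwise_append] at hpw
    obtain ⟨hpw1, hpw2, hcross⟩ := hpw
    rw [List.pairwise_cons] at hpw2
    obtain ⟨hD2lt, _⟩ := hpw2
    have hD1gt : ∀ c ∈ D1, c > k x := fun c hc => hcross c hc (k x) (by simp)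
    -- right-hand side: peel the last insertion off the insertion sort
    rw [PySem.List.sorted_rev_eq_foldl_insertBy, List.foldl_append,
        ← PySem.List.sorted_rev_eq_foldl_insertBy,
        ← ih (fun m hm => hmem m (by simp [hm]))]
    simp only [List.foldl_cons, List.foldl_nil]
    -- left-hand side: the new element lands at the end of its own bucket
    have hfilt : ∀ c : Int, (xs ++ [x]).filter (fun m => decide (k m = c))
        = xs.filter (fun m => decide (k m = c)) ++ if k x = c then [x] else [] := by
      intro c
      rw [List.filter_append]
      by_cases hxc : k x = c <;> simp [hxc]
    have h1 : (D1.flatMap (fun c => (xs ++ [x]).filter (fun m => decide (k m = c))))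
        = D1.flatMap (fun c => xs.filter (fun m => decide (k m = c))) := by
      apply pv_flatMap_congr
      intro c hc
      have : k x ≠ c := by have := hD1gt c hc; omega
      rw [hfilt c, if_neg this, List.append_nil]
    have h2 : (D2.flatMap (fun c => (xs ++ [x]).filter (fun m => decide (k m = c))))
        = D2.flatMap (fun c => xs.filter (fun m => decide (k m = c))) := by
      apply pv_flatMap_congr
      intro c hc
      have : k x ≠ c := by have := hD2lt c hc; omega
      rw [hfilt c, if_neg this, List.append_nil]
    rw [List.flatMap_append, List.flatMap_cons, h1, h2, hfilt (k x), if_pos rfl,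
        List.flatMap_append, List.flatMap_cons]
    -- now move x across the insertion
    have hL1 : ∀ y ∈ D1.flatMap (fun c => xs.filter (fun m => decide (k m = c)))
        ++ xs.filter (fun m => decide (k m = k x)), ¬ (k y < k x) := by
      intro y hy
      rcases List.mem_append.mp hy with hy | hy
      · obtain ⟨c, hc, hyf⟩ := List.mem_flatMap.mp hy
        have : k y = c := by simpa using (List.mem_filter.mp hyf).2
        have := hD1gt c hc
        omega
      · have : k y = k x := by simpa using (List.mem_filter.mp hy).2
        omega
    have hL2 : ∀ y ∈ D2.flatMap (fun c => xs.filter (fun m => decide (k m = c))), k y < k x := by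
      intro y hy
      obtain ⟨c, hc, hyf⟩ := List.mem_flatMap.mp hy
      have : k y = c := by simpa using (List.mem_filter.mp hyf).2
      have := hD2lt c hc
      omega
    rw [show D1.flatMap (fun c => xs.filter (fun m => decide (k m = c)))
          ++ (xs.filter (fun m => decide (k m = k x))
              ++ D2.flatMap (fun c => xs.filter (fun m => decide (k m = c))))
        = (D1.flatMap (fun c => xs.filter (fun m => decide (k m = c)))
            ++ xs.filter (fun m => decide (k m = k x)))
          ++ D2.flatMap (fun c => xs.filter (fun m => decide (k m = c))) from by
      simp [List.append_assoc]]
    rw [pv_insertBy_append k x _ _ hL1, pv_insertBy_all_lt k x _ hL2]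
    simp [List.append_assoc]

-- range(maxc, -1, -1) is the descending list maxc, maxc-1, …, 0
theorem pvD_eq (maxc : Int) :
    PySem.List.pyRange maxc (-1) (-1)
      = (List.range (maxc + 1).toNat).map (fun n : Nat => maxc - (n : Int)) := by
  simp only [PySem.List.pyRange]
  rw [if_neg (by norm_num), if_neg (by norm_num)]
  by_cases h : (-1 : Int) < maxc
  · rw [if_pos h]
    have h1 : ((maxc - -1 + - -1 - 1) / - -1) = maxc + 1 := by norm_num
    rw [h1]
    exact List.map_congr_left (fun j _ => by ring)
  · rw [if_neg h]
    have h0 : (maxc + 1).toNat = 0 := by omega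
    rw [h0]
    rfl

theorem pvD_pairwise (maxc : Int) :
    (PySem.List.pyRange maxc (-1) (-1)).Pairwise (· > ·) := by
  rw [pvD_eq]
  refine List.Pairwise.map _ ?_ List.pairwise_lt_range
  intro a b hab
  show maxc - (a : Int) > maxc - (b : Int)
  exact sub_lt_sub_left (by exact_mod_cast hab) maxc

theorem pvD_mem (maxc c : Int) (h0 : 0 ≤ c) (h1 : c ≤ maxc) :
    c ∈ PySem.List.pyRange maxc (-1) (-1) := by
  rw [pvD_eq]
  exact List.mem_map.mpr ⟨(maxc - c).toNat, List.mem_range.mpr (by omega), by omega⟩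

-- every count is ≤ max(counts, default=-1)
theorem pv_le_maxD (counts : List Int) (c : Int) (hc : c ∈ counts) :
    c ≤ PySem.List.maxD counts (fun x => x) (-1) := by
  unfold PySem.List.maxD
  cases h : PySem.List.max? counts (fun x => x) with
  | none =>
    rw [PySem.List.max?_eq_none_iff] at h
    subst h
    simp at hc
  | some m =>
    have := PySem.List.max?_isMax h c hc
    simpa using this

-- the inner 'for m, cm in zip(...): if cm == c: ordered.append(m)' loop collects bucket c
theorem pv_inner_eq (kI : String → Int) (c : Int) :
    ∀ (pm acc : List String),
      (pm.zip (pm.map kI)).foldl (fun a p => if p.2 = c then a ++ [p.1] else a) acc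
        = acc ++ pm.filter (fun m => decide (kI m = c)) := by
  intro pm
  induction pm with
  | nil => simp
  | cons m t ih =>
    intro acc
    simp only [List.map_cons, List.zip_cons_cons, List.foldl_cons]
    by_cases hm : kI m = c
    · rw [if_pos hm, ih]
      simp [hm]
    · rw [if_neg hm, ih]
      simp [hm]

-- B's 'ordered' list is exactly A's freq_movements
theorem pv_ordered_eq (ct : String) (pm : List String) :
    (PySem.List.pyRange
        (PySem.List.maxD (pm.map (fun m => (PySem.Str.count ct m : Int))) (fun c => c) (-1))
        (-1) (-1)).foldl
      (fun acc c => (pm.zip (pm.map (fun m => (PySem.Str.count ct m : Int)))).foldl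
        (fun a p => if p.2 = c then a ++ [p.1] else a) acc) []
    = PySem.List.sorted pm (fun x => PySem.Str.count ct x) true := by
  set kI : String → Int := fun m => (PySem.Str.count ct m : Int) with hkI
  set maxc := PySem.List.maxD (pm.map kI) (fun c => c) (-1) with hmaxc
  have hstep : ∀ (acc : List String), ∀ c ∈ PySem.List.pyRange maxc (-1) (-1),
      (pm.zip (pm.map kI)).foldl (fun a p => if p.2 = c then a ++ [p.1] else a) acc
        = acc ++ pm.filter (fun m => decide (kI m = c)) :=
    fun acc c _ => pv_inner_eq kI c pm acc
  rw [PySem.List.foldl_congr_mem _ _ _ _ hstep,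
      PySem.List.foldl_append_eq_flatMap, List.nil_append]
  have hmem : ∀ m ∈ pm, kI m ∈ PySem.List.pyRange maxc (-1) (-1) := by
    intro m hm
    apply pvD_mem
    · simp [hkI]
    · exact pv_le_maxD _ _ (List.mem_map_of_mem hm)
  rw [pv_buckets_eq_sorted kI _ (pvD_pairwise maxc) pm hmem]
  -- the Int-valued key sorts exactly like the Nat-valued key (the cast is monotone)
  rw [PySem.List.sorted_rev_eq_foldl_insertBy, PySem.List.sorted_rev_eq_foldl_insertBy]
  have : (fun a b => decide (kI b < kI a))
      = (fun a b => decide (PySem.Str.count ct b < PySem.Str.count ct a)) := by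
    funext a b
    simp [hkI]
  rw [this]

-- ===== VERDICT (by name: the statement is the Claim_ definition above) =====
theorem brute_force_frequency_analysis_spec : Claim_equal_brute_force_frequency_analysis := by
  intro cipher_text possible_movements _
  unfold Spec_brute_force_frequency_analysis
  unfold brute_force_frequency_analysis brute_force_frequency_analysis_alt
  simp only []
  rw [pv_ordered_eq]
  exact pvLoop_eq _ _ _ []
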